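-- pv_equiv track=rewrite | github.com/mhk-code2005/TIC-TAC-TOE | Rules.py | creatingAmoveBoard
-- ===== SOURCE A (Python) =====
-- def creatingAmoveBoard(n):
--     exampleBoard=[]
--     moveList=[]
--     board=[]
--     numberOfRows=0
--     numberOfCols=0
--     for i in range(n):
--             row=[]
--             row2=[]
--             for i in range(n):
--                 row2.append('?')
--                 if numberOfCols>n-1:
--                     numberOfCols=numberOfCols%n
--                 row.append((numberOfRows,numberOfCols))
--                 moveList.append((numberOfRows,numberOfCols))
--                 numberOfCols+=1
--             exampleBoard.append(row)
--             numberOfRows+=1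
--             board.append(row2)
--     return moveList, exampleBoard, board
-- ===== SOURCE B (Python) =====
-- def creatingAmoveBoard(n):
--     moveList = [(r, c) for r in range(n) for c in range(n)]
--     exampleBoard = [moveList[r * n:(r + 1) * n] for r in range(n)]
--     board = [['?'] * n for _ in range(n)]
--     return moveList, exampleBoard, board
-- ===== Notes on version B (the rewrite author's own statement) =====
-- stated objective: simpler
-- what changed: Replaces the nested loops with lockstep counter variables and a wrap-around modulo reset by one flat coordinate comprehension, with exampleBoard derived by slicing the flat list into rows and board built independently by list multiplication.
import Mathlib
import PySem

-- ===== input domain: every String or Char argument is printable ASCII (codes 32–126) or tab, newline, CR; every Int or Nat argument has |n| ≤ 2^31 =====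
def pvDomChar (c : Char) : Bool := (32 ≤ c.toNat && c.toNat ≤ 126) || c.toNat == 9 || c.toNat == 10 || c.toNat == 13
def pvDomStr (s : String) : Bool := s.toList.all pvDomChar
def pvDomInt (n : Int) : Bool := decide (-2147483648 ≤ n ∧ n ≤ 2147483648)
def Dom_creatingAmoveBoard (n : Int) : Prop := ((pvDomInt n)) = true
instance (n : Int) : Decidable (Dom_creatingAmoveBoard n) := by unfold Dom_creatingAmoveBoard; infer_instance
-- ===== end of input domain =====

-- B replaces A's lockstep counters and modulo wrap-around with one flat coordinate
-- comprehension, slicing it into rows for exampleBoard and building board independently (simpler).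

-- ===== PORT A =====
-- inner 'for i in range(n)' loop: state (row2, row, moveList, numberOfCols), run k times
def pvInnerA (n rows : Int) : Nat → List String → List (Int × Int) → List (Int × Int) → Int →
    (List String × List (Int × Int) × List (Int × Int) × Int)
  | 0, row2, row, mv, cols => (row2, row, mv, cols)
  | k+1, row2, row, mv, cols =>
      let row2 := row2 ++ ["?"]
      let cols := if cols > n - 1 then PySem.Int.mod cols n else cols
      let row := row ++ [(rows, cols)]
      let mv := mv ++ [(rows, cols)]
      pvInnerA n rows k row2 row mv (cols + 1)

-- outer 'for i in range(n)' loop: state (exampleBoard, moveList, board, numberOfRows, numberOfCols)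
def pvOuterA (n : Int) : Nat → List (List (Int × Int)) → List (Int × Int) → List (List String) → Int → Int →
    (List (List (Int × Int)) × List (Int × Int) × List (List String) × Int × Int)
  | 0, exB, mv, board, rows, cols => (exB, mv, board, rows, cols)
  | k+1, exB, mv, board, rows, cols =>
      let st := pvInnerA n rows n.toNat [] [] mv cols
      pvOuterA n k (exB ++ [st.2.1]) st.2.2.1 (board ++ [st.1]) (rows + 1) st.2.2.2

def creatingAmoveBoard (n : Int) : (List (Int × Int)) × (List (List (Int × Int))) × List (List String) :=
  let r := pvOuterA n n.toNat [] [] [] 0 0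
  (r.2.1, r.1, r.2.2.1)

-- ===== PORT B =====
def creatingAmoveBoard_alt (n : Int) : (List (Int × Int)) × (List (List (Int × Int))) × List (List String) :=
  let moveList := (PySem.List.pyRange 0 n 1).flatMap
    (fun r => (PySem.List.pyRange 0 n 1).map (fun c => (r, c)))
  let exampleBoard := (PySem.List.pyRange 0 n 1).map
    (fun r => PySem.List.slice moveList (some (r * n)) (some ((r + 1) * n)))
  let board := (PySem.List.pyRange 0 n 1).map (fun _ => List.replicate n.toNat "?")
  (moveList, exampleBoard, board)

-- ===== PRECONDITION & SPEC =====
def Spec_creatingAmoveBoard (n : Int) (out : (List (Int × Int)) × (List (List (Int × Int))) × List (List String)) : Prop := out = creatingAmoveBoard_alt n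
instance (n : Int) (out : (List (Int × Int)) × (List (List (Int × Int))) × List (List String)) : Decidable (Spec_creatingAmoveBoard n out) := by unfold Spec_creatingAmoveBoard; infer_instance

-- ===== CLAIM (what is proved, stated in full; the proofs are below) =====
def Claim_equal_creatingAmoveBoard : Prop := ∀ (n : Int), Dom_creatingAmoveBoard n → Spec_creatingAmoveBoard n (creatingAmoveBoard n)

-- ===== LEMMAS AND PROOFS =====

-- one row of coordinates with row index r, for board size m
def pvRowL (m : Nat) (r : Int) : List (Int × Int) := (List.range m).map (fun j : Nat => (r, (j : Int)))

-- inner loop, no wrap triggered: columns count up from c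
theorem pvInnerA_run (n rows : Int) : ∀ (k : Nat) (c : Int) (row2 : List String)
    (row mv : List (Int × Int)), 0 ≤ c → c + k ≤ n →
    pvInnerA n rows k row2 row mv c =
      (row2 ++ List.replicate k "?",
       row ++ (List.range k).map (fun j : Nat => (rows, c + (j : Int))),
       mv ++ (List.range k).map (fun j : Nat => (rows, c + (j : Int))),
       c + k) := by
  intro k
  induction k with
  | zero => intro c row2 row mv _ _; simp [pvInnerA]
  | succ k ih =>
      intro c row2 row mv hc hk
      have hlt : ¬ c > n - 1 := by push_cast at hk ⊢; omega
      have hmap : (List.range (k+1)).map (fun j : Nat => (rows, c + (j : Int))) =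
          (rows, c) :: (List.range k).map (fun j : Nat => (rows, (c+1) + (j : Int))) := by
        rw [List.range_succ_eq_map]
        simp only [List.map_cons, List.map_map, Nat.cast_zero, add_zero, Function.comp_def]
        congr 1
        apply List.map_congr_left
        intro a _
        congr 1; push_cast; ring
      rw [pvInnerA, if_neg hlt]
      rw [ih (c + 1) _ _ _ (by omega) (by push_cast at hk ⊢; omega)]
      rw [hmap, List.replicate_succ]
      simp [List.append_assoc]
      omega

-- a full inner pass: starting cols is 0 (first row) or n (later rows, wrapped by %)
theorem pvInnerA_full (n rows : Int) (hn : 0 < n) (mv : List (Int × Int)) (c : Int)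
    (hc : c = 0 ∨ c = n) :
    pvInnerA n rows n.toNat [] [] mv c =
      (List.replicate n.toNat "?", pvRowL n.toNat rows, mv ++ pvRowL n.toNat rows, n) := by
  have hnt : ((n.toNat : Int)) = n := Int.toNat_of_nonneg (le_of_lt hn)
  rcases hc with hc | hc
  · subst hc
    rw [pvInnerA_run n rows n.toNat 0 [] [] mv le_rfl (by omega)]
    simp [pvRowL, hnt]
  · rw [hc]
    obtain ⟨k, hk⟩ : ∃ k, n.toNat = k + 1 := ⟨n.toNat - 1, by omega⟩
    have hmod : PySem.Int.mod n n = 0 := by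
      exact (PySem.Int.mod_eq_zero_iff_dvd n n).mpr (dvd_refl n)
    rw [hk, pvInnerA]
    rw [if_pos (show n > n - 1 by omega)]
    rw [hmod]
    simp only [List.nil_append, zero_add]
    rw [pvInnerA_run n rows k 1 _ _ _ (by omega) (by omega)]
    have hrow : pvRowL (k + 1) rows =
        (rows, 0) :: (List.range k).map (fun j : Nat => (rows, 1 + (j : Int))) := by
      rw [pvRowL, List.range_succ_eq_map]
      simp only [List.map_cons, List.map_map, Nat.cast_zero, Function.comp_def]
      congr 1
      apply List.map_congr_left
      intro a _
      congr 1; push_cast; ring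
    rw [hrow, List.replicate_succ]
    simp [List.append_assoc]
    omega

-- outer loop: appends k rows starting at row index r; cols invariant 0-or-n
theorem pvOuterA_run (n : Int) (hn : 0 < n) : ∀ (k : Nat) (r : Int)
    (exB : List (List (Int × Int))) (mv : List (Int × Int)) (board : List (List String))
    (c : Int), c = 0 ∨ c = n →
    pvOuterA n k exB mv board r c =
      (exB ++ (List.range k).map (fun i : Nat => pvRowL n.toNat (r + (i : Int))),
       mv ++ (List.range k).flatMap (fun i : Nat => pvRowL n.toNat (r + (i : Int))),
       board ++ List.replicate k (List.replicate n.toNat "?"),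
       r + k,
       if k = 0 then c else n) := by
  intro k
  induction k with
  | zero => intro r exB mv board c _; simp [pvOuterA]
  | succ k ih =>
      intro r exB mv board c hc
      have hmapR : ∀ (g : Int → List (Int × Int)),
          (List.range (k+1)).map (fun i : Nat => g (r + (i : Int))) =
          g r :: (List.range k).map (fun i : Nat => g ((r+1) + (i : Int))) := by
        intro g
        rw [List.range_succ_eq_map]
        simp only [List.map_cons, List.map_map, Nat.cast_zero, add_zero, Function.comp_def]
        congr 1
        apply List.map_congr_left
        intro a _
        congr 1; push_cast; ring
      have hflatR : (List.range (k+1)).flatMap (fun i : Nat => pvRowL n.toNat (r + (i : Int))) =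
          pvRowL n.toNat r ++ (List.range k).flatMap (fun i : Nat => pvRowL n.toNat ((r+1) + (i : Int))) := by
        rw [List.range_succ_eq_map]
        simp only [List.flatMap_cons, List.flatMap_map, Nat.cast_zero, add_zero]
        congr 1
        apply List.flatMap_congr
        intro a _
        congr 1; push_cast; ring
      rw [pvOuterA]
      rw [pvInnerA_full n r hn mv c hc]
      rw [ih (r + 1) _ _ _ n (Or.inr rfl)]
      rw [hmapR, hflatR, List.replicate_succ]
      simp [List.append_assoc]
      omega

-- taking chunk i out of a flattened list of rows of uniform length m
theorem pvFlatten_chunk {α : Type} (m : Nat) : ∀ (l : List (List α)) (i : Nat),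
    ∀ (hi : i < l.length), (∀ x ∈ l, x.length = m) →
    ((l.flatten.drop (i * m)).take m) = l[i]'hi := by
  intro l
  induction l with
  | nil => intro i hi _; simp at hi
  | cons x xs ih =>
      intro i hi hlen
      have hx : x.length = m := hlen x (by simp)
      cases i with
      | zero => simp [List.flatten_cons, ← hx]
      | succ i =>
          have heq : (i + 1) * m = x.length + i * m := by rw [hx]; ring
          rw [List.flatten_cons, heq, List.drop_append]
          rw [List.drop_eq_nil_of_le (by omega : x.length ≤ x.length + i * m)]
          simp only [List.nil_append, Nat.add_sub_cancel_left]
          rw [ih i (by simpa using hi) (fun y hy => hlen y (by simp [hy]))]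
          simp

-- ===== VERDICT (by name: the statement is the Claim_ definition above) =====
theorem creatingAmoveBoard_spec : Claim_equal_creatingAmoveBoard := by
  intro n _
  unfold Spec_creatingAmoveBoard creatingAmoveBoard creatingAmoveBoard_alt
  by_cases hn : 0 < n
  · have hnt : ((n.toNat : Int)) = n := Int.toNat_of_nonneg (le_of_lt hn)
    rw [pvOuterA_run n hn n.toNat 0 [] [] [] 0 (Or.inl rfl)]
    rw [PySem.List.pyRange_one]
    simp only [sub_zero, zero_add, List.map_map, List.flatMap_map, List.nil_append,
      Function.comp_def]
    have hB : (List.range n.toNat).flatMap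
        (fun (a : Nat) => (List.range n.toNat).map (fun (k : Nat) => ((a : Int), (k : Int)))) =
        (List.range n.toNat).flatMap (fun i : Nat => pvRowL n.toNat ((i : Int))) := by
      simp [pvRowL]
    rw [hB]
    refine Prod.ext rfl (Prod.ext ?_ ?_)
    · -- exampleBoard
      simp only []
      apply List.map_congr_left
      intro i hi
      have him : i < n.toNat := List.mem_range.mp hi
      have hb1 : ((i : Int)) * n = (((i * n.toNat : Nat) : Int)) := by
        push_cast; rw [hnt]
      have hb2 : ((i : Int) + 1) * n = (((i * n.toNat : Nat) : Int)) + ((n.toNat : Int)) := by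
        push_cast; rw [hnt]; ring
      rw [hb1, hb2, PySem.List.slice_natCast_add]
      have hlens : ∀ x ∈ (List.range n.toNat).map (fun i : Nat => pvRowL n.toNat ((i : Int))),
          x.length = n.toNat := by
        intro x hx
        obtain ⟨j, _, hj⟩ := List.mem_map.mp hx
        rw [← hj]; simp [pvRowL]
      have hch := pvFlatten_chunk n.toNat
        ((List.range n.toNat).map (fun i : Nat => pvRowL n.toNat ((i : Int)))) i
        (by simpa using him) hlens
      rw [List.flatten_eq_flatMap, List.flatMap_map] at hch
      simp only [id_eq] at hch
      rw [hch]
      simp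
    · -- board
      simp [List.map_const']
  · have h0 : n.toNat = 0 := by omega
    rw [h0]
    simp [pvOuterA, PySem.List.pyRange_one_eq_nil (by omega : n ≤ 0)]
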